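-- pv_equiv track=rewrite | github.com/pypi-data/pypi-mirror-42 | packages/vault-keepass-import/vault-keepass-import-2.0.0.tar.gz/vault-keepass-import-2.0.0/vault_keepass_import/main.py | export_info
-- ===== SOURCE A (Python) =====
-- def export_info(state, path, old, new):
--     if state == 'ok':
--         impacted = ''
--     else:
--         info = []
--         added = sorted(set(new.keys()) - set(old.keys()))
--         if added:
--             info.append(f'added {" ".join(added)}')
--         removed = sorted(set(old.keys()) - set(new.keys()))
--         if removed:
--             info.append(f'removed {" ".join(removed)}')
--         changed = []
--         for k in sorted(set(old.keys()) & set(new.keys())):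
--             if old[k] != new[k]:
--                 changed.append(k)
--         if changed:
--             info.append(f'changed {" ".join(changed)}')
--         impacted = f' {", ".join(info)}'
--     return f'{state}: {path}{impacted}'
-- ===== SOURCE B (Python) =====
-- def export_info(state, path, old, new):
--     if state == 'ok':
--         return f'{state}: {path}'
--     old_keys = set(old.keys())
--     new_keys = set(new.keys())
--     added, removed, changed = [], [], []
--     for k in sorted(old_keys | new_keys):
--         if k not in old_keys:
--             added.append(k)
--         elif k not in new_keys:
--             removed.append(k)
--         elif old[k] != new[k]:
--             changed.append(k)
--     info = []
--     if added:
--         info.append(f'added {" ".join(added)}')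
--     if removed:
--         info.append(f'removed {" ".join(removed)}')
--     if changed:
--         info.append(f'changed {" ".join(changed)}')
--     return f'{state}: {path} {", ".join(info)}'
-- ===== Notes on version B (the rewrite author's own statement) =====
-- stated objective: alternative
-- what changed: Replaces A's three separate set-difference/intersection computations (each followed by its own sort) by one pass: sort the union of old and new keys once and classify each key as added/removed/changed in a single loop.
import Mathlib
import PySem

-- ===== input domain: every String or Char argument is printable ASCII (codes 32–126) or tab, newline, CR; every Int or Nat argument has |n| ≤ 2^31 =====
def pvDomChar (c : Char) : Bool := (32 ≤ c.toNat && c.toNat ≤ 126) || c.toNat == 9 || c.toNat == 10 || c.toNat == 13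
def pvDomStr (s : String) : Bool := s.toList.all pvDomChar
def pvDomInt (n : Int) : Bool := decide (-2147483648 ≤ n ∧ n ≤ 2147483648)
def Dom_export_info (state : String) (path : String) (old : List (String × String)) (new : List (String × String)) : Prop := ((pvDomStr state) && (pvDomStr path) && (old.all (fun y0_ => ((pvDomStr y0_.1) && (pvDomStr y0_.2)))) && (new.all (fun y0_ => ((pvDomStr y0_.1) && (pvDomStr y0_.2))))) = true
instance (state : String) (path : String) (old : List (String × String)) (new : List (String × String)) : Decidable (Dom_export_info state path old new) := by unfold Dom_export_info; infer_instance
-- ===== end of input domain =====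

-- B replaces A's three separate set-difference/intersection+sort passes by one classifying loop
-- over the sorted union of the keys (objective: alternative decomposition, same cost).


-- shared helper: dict lookup d[k] (first match; both Pythons index the same dicts the same way)
def keyGet (m : List (String × String)) (k : String) : String :=
  (PySem.Dict.mk m).getD k ""

-- ===== PORT A =====
def export_info (state : String) (path : String) (old : List (String × String)) (new : List (String × String)) : String :=
  let impacted : String :=
    if state = "ok" then ""
    else
      let okeys : PySem.Set String := PySem.Set.ofList (old.map Prod.fst)
      let nkeys : PySem.Set String := PySem.Set.ofList (new.map Prod.fst)
      let info : List String := []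
      let added := PySem.List.sorted (PySem.Set.diff nkeys okeys) (fun x => x)
      let info := if added ≠ [] then info ++ ["added " ++ PySem.Str.join " " added] else info
      let removed := PySem.List.sorted (PySem.Set.diff okeys nkeys) (fun x => x)
      let info := if removed ≠ [] then info ++ ["removed " ++ PySem.Str.join " " removed] else info
      let changed := (PySem.List.sorted (PySem.Set.inter okeys nkeys) (fun x => x)).foldl
          (fun acc k => if keyGet old k ≠ keyGet new k then acc ++ [k] else acc) []
      let info := if changed ≠ [] then info ++ ["changed " ++ PySem.Str.join " " changed] else info
      " " ++ PySem.Str.join ", " info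
  state ++ ": " ++ path ++ impacted

-- ===== PORT B =====
def export_info_alt (state : String) (path : String) (old : List (String × String)) (new : List (String × String)) : String :=
  if state = "ok" then state ++ ": " ++ path
  else
    let old_keys : PySem.Set String := PySem.Set.ofList (old.map Prod.fst)
    let new_keys : PySem.Set String := PySem.Set.ofList (new.map Prod.fst)
    let t := (PySem.List.sorted (PySem.Set.union old_keys new_keys) (fun x => x)).foldl
      (fun (t : List String × List String × List String) k =>
        if !(PySem.Set.contains old_keys k) then (t.1 ++ [k], t.2.1, t.2.2)
        else if !(PySem.Set.contains new_keys k) then (t.1, t.2.1 ++ [k], t.2.2)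
        else if keyGet old k ≠ keyGet new k then (t.1, t.2.1, t.2.2 ++ [k])
        else t) ([], [], [])
    let info : List String := []
    let info := if t.1 ≠ [] then info ++ ["added " ++ PySem.Str.join " " t.1] else info
    let info := if t.2.1 ≠ [] then info ++ ["removed " ++ PySem.Str.join " " t.2.1] else info
    let info := if t.2.2 ≠ [] then info ++ ["changed " ++ PySem.Str.join " " t.2.2] else info
    state ++ ": " ++ path ++ " " ++ PySem.Str.join ", " info

-- ===== PRECONDITION & SPEC =====
def Spec_export_info (state : String) (path : String) (old : List (String × String)) (new : List (String × String)) (out : String) : Prop := out = export_info_alt state path old new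
instance (state : String) (path : String) (old : List (String × String)) (new : List (String × String)) (out : String) : Decidable (Spec_export_info state path old new out) := by unfold Spec_export_info; infer_instance

-- ===== CLAIM (what is proved, stated in full; the proofs are below) =====
def Claim_equal_export_info : Prop := ∀ (state : String) (path : String) (old : List (String × String)) (new : List (String × String)), Dom_export_info state path old new → Spec_export_info state path old new (export_info state path old new)

-- ===== LEMMAS AND PROOFS =====

-- B's single classifying loop = three filters over the traversed keys
theorem classify_foldl (p1 p2 : String → Bool) (p3 : String → Prop) [DecidablePred p3] :
    ∀ (keys a b c : List String),
      keys.foldl (fun (t : List String × List String × List String) k =>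
        if p1 k then (t.1 ++ [k], t.2.1, t.2.2)
        else if p2 k then (t.1, t.2.1 ++ [k], t.2.2)
        else if p3 k then (t.1, t.2.1, t.2.2 ++ [k])
        else t) (a, b, c)
      = (a ++ keys.filter p1,
         b ++ keys.filter (fun k => !p1 k && p2 k),
         c ++ keys.filter (fun k => !p1 k && !p2 k && decide (p3 k))) := by
  intro keys
  induction keys with
  | nil => intro a b c; simp
  | cons k ks ih =>
    intro a b c
    by_cases h1 : p1 k = true
    · simp [List.foldl_cons, h1, ih]
    · by_cases h2 : p2 k = true
      · simp [List.foldl_cons, h1, h2, ih]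
      · by_cases h3 : p3 k
        · simp [List.foldl_cons, h1, h2, h3, ih]
        · simp [List.foldl_cons, h1, h2, h3, ih]

-- filtering a sorted nodup list = sorting the filtered list
theorem filter_sorted (L : List String) (hL : L.Nodup) (p : String → Bool) :
    (PySem.List.sorted L (fun x => x)).filter p
      = PySem.List.sorted (L.filter p) (fun x => x) := by
  refine (PySem.List.sorted_eq_of_perm_of_pairwise_lt _ _ _ ?_ ?_).symm
  · exact (PySem.List.sorted_perm L (fun x => x) false).filter p
  · have hnd : (PySem.List.sorted L (fun x => x)).Nodup :=
      ((PySem.List.sorted_perm L (fun x => x) false).symm).nodup hL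
    have hle : (PySem.List.sorted L (fun x => x)).Pairwise (fun a b => a ≤ b) :=
      PySem.List.sorted_pairwise L (fun x => x)
    have hlt : (PySem.List.sorted L (fun x => x)).Pairwise (fun a b => a < b) :=
      (hle.and hnd).imp (fun h => lt_of_le_of_ne h.1 h.2)
    exact hlt.filter p

-- ===== VERDICT (by name: the statement is the Claim_ definition above) =====
theorem export_info_spec : Claim_equal_export_info := by
  intro state path old new _
  unfold Spec_export_info export_info export_info_alt
  by_cases hs : state = "ok"
  · simp [hs]
  · simp only [hs, if_false]
    set O : PySem.Set String := PySem.Set.ofList (old.map Prod.fst) with hO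
    set N : PySem.Set String := PySem.Set.ofList (new.map Prod.fst) with hN
    have hOnd : O.Nodup := PySem.Set.nodup_ofList _
    have hNnd : N.Nodup := PySem.Set.nodup_ofList _
    have hU : PySem.Set.union O N = O ++ N.filter (fun y => !(PySem.Set.contains O y)) := by
      show PySem.Set.update O N = _
      rw [PySem.Set.update_eq_append_filter, PySem.Set.ofList_eq_self_of_nodup N hNnd]
    have hUnd : (PySem.Set.union O N).Nodup := PySem.Set.nodup_union O N hOnd
    -- the three Bool/Prop tests of B's classifying loop
    set p1 : String → Bool := fun k => !(PySem.Set.contains O k) with hp1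
    set p2 : String → Bool := fun k => !(PySem.Set.contains N k) with hp2
    have hOp1 : O.filter p1 = [] := by
      refine List.filter_eq_nil_iff.mpr ?_
      intro a ha
      simp [hp1]
      exact ha
    -- added
    have h1 : (PySem.List.sorted (PySem.Set.union O N) (fun x => x)).filter p1
        = PySem.List.sorted (PySem.Set.diff N O) (fun x => x) := by
      rw [filter_sorted _ hUnd]
      congr 1
      rw [hU, List.filter_append, hOp1, List.nil_append, List.filter_filter]
      exact List.filter_congr (fun x _ => by simp [hp1])
    -- removed
    have h2 : (PySem.List.sorted (PySem.Set.union O N) (fun x => x)).filter (fun k => !p1 k && p2 k)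
        = PySem.List.sorted (PySem.Set.diff O N) (fun x => x) := by
      rw [filter_sorted _ hUnd]
      congr 1
      rw [hU, List.filter_append]
      have hN0 : (N.filter (fun y => !(PySem.Set.contains O y))).filter (fun k => !p1 k && p2 k) = [] := by
        refine List.filter_eq_nil_iff.mpr ?_
        intro a ha
        have := (List.mem_filter.mp ha).2
        simp [hp1] at this ⊢
        intro hc
        simp [this] at hc
      rw [hN0, List.append_nil]
      exact List.filter_congr (fun x hx => by
        simp [hp1, hp2]
        intro _
        exact hx)
    -- changed
    have h3 : (PySem.List.sorted (PySem.Set.union O N) (fun x => x)).filter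
          (fun k => !p1 k && (!p2 k && decide (keyGet old k ≠ keyGet new k)))
        = (PySem.List.sorted (PySem.Set.inter O N) (fun x => x)).filter
          (fun k => decide (keyGet old k ≠ keyGet new k)) := by
      rw [filter_sorted _ hUnd, filter_sorted _ (PySem.Set.nodup_inter O N hOnd)]
      congr 1
      rw [hU, List.filter_append]
      have hN0 : (N.filter (fun y => !(PySem.Set.contains O y))).filter
          (fun k => !p1 k && (!p2 k && decide (keyGet old k ≠ keyGet new k))) = [] := by
        refine List.filter_eq_nil_iff.mpr ?_
        intro a ha
        have := (List.mem_filter.mp ha).2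
        simp [hp1] at this ⊢
        intro hc
        simp [this] at hc
      rw [hN0, List.append_nil]
      have : PySem.Set.inter O N = O.filter (fun x => PySem.Set.contains N x) := rfl
      rw [this, List.filter_filter]
      exact List.filter_congr (fun x hx => by
        simp [hp1, hp2, hx, Bool.and_comm])
    rw [classify_foldl p1 p2 (fun k => keyGet old k ≠ keyGet new k),
        PySem.List.foldl_append_ite_eq_filter (fun k => keyGet old k ≠ keyGet new k)]
    simp only [List.nil_append]
    rw [h1, h2]
    rw [show (fun k => !p1 k && !p2 k && decide (keyGet old k ≠ keyGet new k))
        = (fun k => !p1 k && (!p2 k && decide (keyGet old k ≠ keyGet new k))) from by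
      funext k; rw [Bool.and_assoc]]
    rw [h3]
    simp [String.append_assoc]
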